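-- pv_equiv track=rewrite | github.com/YavuzVoid/algorithm-solutions | hackerrank/medium/longest_alternating_binary_substring.py | longestAlternatingSubstring
-- ===== SOURCE A (Python) =====
-- def longestAlternatingSubstring(s, k):
--     n = len(s)
--     if n == 0:
--         return 0
--     best = 0
--     for start_char in '01':
--         flips = 0
--         left = 0
--         for right in range(n):
--             expected = str((int(start_char) + right) % 2)
--             if s[right] != expected:
--                 flips += 1
--             while flips > k:
--                 exp_left = str((int(start_char) + left) % 2)
--                 if s[left] != exp_left:
--                     flips -= 1
--                 left += 1
--             best = max(best, right - left + 1)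
--     return best
-- ===== SOURCE B (Python) =====
-- def longestAlternatingSubstring(s, k):
--     n = len(s)
--     if n == 0:
--         return 0
--     best = 0
--     for start in (0, 1):
--         # prefix sums of mismatches against the alternating pattern starting with `start`
--         pref = [0] * (n + 1)
--         for i in range(n):
--             exp = '0' if (start + i) % 2 == 0 else '1'
--             pref[i + 1] = pref[i] + (s[i] != exp)
--         for right in range(n):
--             target = pref[right + 1] - k
--             lo, hi = 0, right + 1
--             while lo < hi:
--                 mid = (lo + hi) // 2
--                 if pref[mid] >= target:
--                     hi = mid
--                 else:
--                     lo = mid + 1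
--             if pref[right + 1] - pref[lo] <= k:
--                 best = max(best, right + 1 - lo)
--     return best
-- ===== Notes on version B (the rewrite author's own statement) =====
-- stated objective: alternative
-- what changed: Replaces the amortized moving-left sliding window with, per start parity, a mismatch prefix-sum table and a binary search over the monotone prefix sums for the smallest feasible left end of each window.
import Mathlib
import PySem

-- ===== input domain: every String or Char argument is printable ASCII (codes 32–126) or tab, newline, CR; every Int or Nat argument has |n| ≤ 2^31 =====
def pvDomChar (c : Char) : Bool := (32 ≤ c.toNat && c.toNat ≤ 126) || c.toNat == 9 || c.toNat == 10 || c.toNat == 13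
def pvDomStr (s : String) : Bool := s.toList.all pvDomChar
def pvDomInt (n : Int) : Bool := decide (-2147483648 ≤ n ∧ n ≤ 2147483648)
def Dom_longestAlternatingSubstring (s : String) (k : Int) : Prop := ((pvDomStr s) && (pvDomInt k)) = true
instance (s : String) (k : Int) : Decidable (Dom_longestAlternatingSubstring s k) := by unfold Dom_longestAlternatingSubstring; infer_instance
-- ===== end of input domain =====

-- B replaces A's amortized moving-left sliding window by per-parity mismatch prefix sums
-- plus a binary search for the smallest feasible left end of each window (alternative
-- decomposition, not claimed faster).

-- ===== PORT A =====

-- expected = str((start + i) % 2), compared character-wise (both are single characters)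
def pvExp (p : Int) (i : Nat) : Char :=
  if PySem.Int.mod (p + (i : Int)) 2 == 0 then '0' else '1'

-- s[i] != expected
def pvMismatch (cs : List Char) (p : Int) (i : Nat) : Bool :=
  cs.getD i ' ' != pvExp p i

-- the `while flips > k:` loop; fuel only makes it total (Python raises IndexError
-- exactly where the fuel could run out, and those inputs are outside Pre_)
def pvShrink (cs : List Char) (p k : Int) : Nat → Int → Nat → Int × Nat
  | 0, flips, left => (flips, left)
  | fuel + 1, flips, left =>
    if k < flips then
      pvShrink cs p k fuel (if pvMismatch cs p left then flips - 1 else flips) (left + 1)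
    else (flips, left)

-- the `for right in range(n):` loop for one start character, threading best through
def pvInnerA (cs : List Char) (p k : Int) (best : Int) : Int :=
  (List.range cs.length |>.foldl
    (fun st r =>
      let flips := if pvMismatch cs p r then st.1 + 1 else st.1
      let fl := pvShrink cs p k (cs.length + 1) flips st.2.1
      (fl.1, fl.2, max st.2.2 ((r : Int) - (fl.2 : Int) + 1)))
    ((0 : Int), (0 : Nat), best)).2.2

def longestAlternatingSubstring (s : String) (k : Int) : Int :=
  let cs := s.toList
  if cs.length = 0 then 0
  else pvInnerA cs 1 k (pvInnerA cs 0 k 0)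

-- ===== PORT B =====

-- pref[i] = number of mismatches among s[0:i] against the pattern starting with `p`
def pvPref (cs : List Char) (p : Int) : Nat → Int
  | 0 => 0
  | i + 1 => pvPref cs p i + (if pvMismatch cs p i then 1 else 0)

-- the hand-written binary search of Source B: least index in [lo, hi) with pref ≥ target, else hi
-- (fuel = hi - lo makes the structural recursion obvious; each step halves the interval)
def pvBsearch (pref : Nat → Int) (target : Int) : Nat → Nat → Nat → Nat
  | 0, lo, _ => lo
  | fuel + 1, lo, hi =>
    if lo < hi then
      let mid := (lo + hi) / 2
      if target ≤ pref mid then pvBsearch pref target fuel lo mid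
      else pvBsearch pref target fuel (mid + 1) hi
    else lo

def pvInnerB (cs : List Char) (p k : Int) (best : Int) : Int :=
  let pref := pvPref cs p
  (List.range cs.length).foldl
    (fun best r =>
      let lo := pvBsearch pref (pref (r + 1) - k) (r + 1) 0 (r + 1)
      if pref (r + 1) - pref lo ≤ k then max best ((r : Int) + 1 - (lo : Int)) else best)
    best

def longestAlternatingSubstring_alt (s : String) (k : Int) : Int :=
  let cs := s.toList
  if cs.length = 0 then 0
  else pvInnerB cs 1 k (pvInnerB cs 0 k 0)

-- ===== PRECONDITION & SPEC =====
-- Pre_ excludes only inputs where A raises: on nonempty s with k < 0 the while loop walks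
-- `left` past the end of s and A raises IndexError.
def Pre_longestAlternatingSubstring (s : String) (k : Int) : Prop :=
  s.toList = [] ∨ 0 ≤ k
instance (s : String) (k : Int) : Decidable (Pre_longestAlternatingSubstring s k) := by
  unfold Pre_longestAlternatingSubstring; infer_instance

def pvWitness_longestAlternatingSubstring : String × Int := ("0100110", 1)

def Spec_longestAlternatingSubstring (s : String) (k : Int) (out : Int) : Prop := out = longestAlternatingSubstring_alt s k
instance (s : String) (k : Int) (out : Int) : Decidable (Spec_longestAlternatingSubstring s k out) := by unfold Spec_longestAlternatingSubstring; infer_instance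

-- ===== CLAIM (what is proved, stated in full; the proofs are below) =====
def Claim_equal_longestAlternatingSubstring : Prop := ∀ (s : String) (k : Int), Dom_longestAlternatingSubstring s k → Pre_longestAlternatingSubstring s k → Spec_longestAlternatingSubstring s k (longestAlternatingSubstring s k)


-- ===== LEMMAS AND PROOFS =====

-- prefix sums are monotone
lemma pvPref_mono (cs : List Char) (p : Int) {i j : Nat} (h : i ≤ j) :
    pvPref cs p i ≤ pvPref cs p j := by
  induction j with
  | zero => simp_all
  | succ j ih =>
    rcases Nat.lt_or_ge i (j + 1) with hlt | hge
    · have := ih (by omega)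
      simp only [pvPref]
      split <;> omega
    · have : i = j + 1 := by omega
      simp [this]

-- everything strictly below the result is below target (needs monotone pref)
lemma pvBsearch_below (pref : Nat → Int) (target : Int)
    (hmono : ∀ i j, i ≤ j → pref i ≤ pref j) (fuel : Nat) :
    ∀ lo hi, (∀ i, i < lo → pref i < target) →
      ∀ i, i < pvBsearch pref target fuel lo hi → pref i < target := by
  induction fuel with
  | zero => intro lo hi hlo i hi'; exact hlo i (by simpa [pvBsearch] using hi')
  | succ fuel ih =>
    intro lo hi hlo i hi'
    simp only [pvBsearch] at hi'
    by_cases hlh : lo < hi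
    · simp only [hlh, if_true] at hi'
      by_cases hm : target ≤ pref ((lo + hi) / 2)
      · simp only [hm, if_true] at hi'
        exact ih lo _ hlo i hi'
      · simp only [hm, if_false] at hi'
        refine ih _ hi ?_ i hi'
        intro j hj
        calc pref j ≤ pref ((lo + hi) / 2) := hmono _ _ (by omega)
          _ < target := by omega
    · simp only [hlh, if_false] at hi'
      exact hlo i hi' 

-- if hi itself is valid, the result is valid
lemma pvBsearch_valid (pref : Nat → Int) (target : Int) (fuel : Nat) :
    ∀ lo hi, lo ≤ hi → hi - lo ≤ fuel → target ≤ pref hi →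
      target ≤ pref (pvBsearch pref target fuel lo hi) := by
  induction fuel with
  | zero =>
    intro lo hi h hf hhi
    have : lo = hi := by omega
    simpa [pvBsearch, this]
  | succ fuel ih =>
    intro lo hi h hf hhi
    simp only [pvBsearch]
    split
    · split
      · exact ih lo ((lo + hi) / 2) (by omega) (by omega) (by assumption)
      · exact ih ((lo + hi) / 2 + 1) hi (by omega) (by omega) hhi
    · simpa using (by omega : lo = hi) ▸ hhi

-- least feasible left end for window ending right before R
lemma pvLeast_exists (cs : List Char) (p k : Int) (hk : 0 ≤ k) (R : Nat) :
    ∃ M, M ≤ R ∧ (pvPref cs p R - pvPref cs p M ≤ k) ∧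
      ∀ i, i < M → ¬ (pvPref cs p R - pvPref cs p i ≤ k) := by
  have hex : ∃ l, pvPref cs p R - pvPref cs p l ≤ k := ⟨R, by omega⟩
  exact ⟨Nat.find hex, Nat.find_min' hex (by omega), Nat.find_spec hex,
    fun i hi => Nat.find_min hex hi⟩

-- the shrink loop reaches exactly the least feasible left end
lemma pvShrink_spec (cs : List Char) (p k : Int) (R L M fuel : Nat)
    (hLM : L ≤ M) (hfuel : M - L < fuel)
    (hMval : pvPref cs p R - pvPref cs p M ≤ k)
    (hMmin : ∀ i, i < M → ¬ (pvPref cs p R - pvPref cs p i ≤ k)) :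
    pvShrink cs p k fuel (pvPref cs p R - pvPref cs p L) L =
      (pvPref cs p R - pvPref cs p M, M) := by
  induction fuel generalizing L with
  | zero => omega
  | succ fuel ih =>
    simp only [pvShrink]
    by_cases hkf : k < pvPref cs p R - pvPref cs p L
    · have hLM' : L < M := by
        rcases Nat.lt_or_ge L M with h | h
        · exact h
        · have hEq : L = M := by omega
          rw [hEq] at hkf; omega
      simp only [hkf, if_true]
      have hstep : (if pvMismatch cs p L then pvPref cs p R - pvPref cs p L - 1
          else pvPref cs p R - pvPref cs p L) = pvPref cs p R - pvPref cs p (L + 1) := by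
        by_cases hm : pvMismatch cs p L
        · simp only [hm, if_true, pvPref]; ring
        · simp [pvPref, hm]
      rw [hstep]
      exact ih (L + 1) (by omega) (by omega)
    · simp only [hkf, if_false]
      have : M ≤ L := by
        by_contra h
        exact (hMmin L (by omega)) (by omega)
      have : L = M := by omega
      subst this
      rfl

-- the two inner loops agree for every start parity
-- the joint loop invariant: A's (flips, left) is the least feasible left end with its
-- mismatch count, and the two running bests coincide
lemma pvFold_inv (cs : List Char) (p k : Int) (hk : 0 ≤ k) (b0 : Int) :
    ∀ r, r ≤ cs.length →
      (((List.range r).foldl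
        (fun st r =>
          let flips := if pvMismatch cs p r then st.1 + 1 else st.1
          let fl := pvShrink cs p k (cs.length + 1) flips st.2.1
          (fl.1, fl.2, max st.2.2 ((r : Int) - (fl.2 : Int) + 1)))
        ((0 : Int), (0 : Nat), b0)).1
          = pvPref cs p r - pvPref cs p ((List.range r).foldl
        (fun st r =>
          let flips := if pvMismatch cs p r then st.1 + 1 else st.1
          let fl := pvShrink cs p k (cs.length + 1) flips st.2.1
          (fl.1, fl.2, max st.2.2 ((r : Int) - (fl.2 : Int) + 1)))
        ((0 : Int), (0 : Nat), b0)).2.1) ∧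
      ((List.range r).foldl
        (fun st r =>
          let flips := if pvMismatch cs p r then st.1 + 1 else st.1
          let fl := pvShrink cs p k (cs.length + 1) flips st.2.1
          (fl.1, fl.2, max st.2.2 ((r : Int) - (fl.2 : Int) + 1)))
        ((0 : Int), (0 : Nat), b0)).2.1 ≤ r ∧
      (pvPref cs p r - pvPref cs p ((List.range r).foldl
        (fun st r =>
          let flips := if pvMismatch cs p r then st.1 + 1 else st.1
          let fl := pvShrink cs p k (cs.length + 1) flips st.2.1
          (fl.1, fl.2, max st.2.2 ((r : Int) - (fl.2 : Int) + 1)))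
        ((0 : Int), (0 : Nat), b0)).2.1 ≤ k) ∧
      (∀ i, i < ((List.range r).foldl
        (fun st r =>
          let flips := if pvMismatch cs p r then st.1 + 1 else st.1
          let fl := pvShrink cs p k (cs.length + 1) flips st.2.1
          (fl.1, fl.2, max st.2.2 ((r : Int) - (fl.2 : Int) + 1)))
        ((0 : Int), (0 : Nat), b0)).2.1 → ¬ (pvPref cs p r - pvPref cs p i ≤ k)) ∧
      ((List.range r).foldl
        (fun st r =>
          let flips := if pvMismatch cs p r then st.1 + 1 else st.1
          let fl := pvShrink cs p k (cs.length + 1) flips st.2.1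
          (fl.1, fl.2, max st.2.2 ((r : Int) - (fl.2 : Int) + 1)))
        ((0 : Int), (0 : Nat), b0)).2.2
          = (List.range r).foldl
        (fun best r =>
          let lo := pvBsearch (pvPref cs p) (pvPref cs p (r + 1) - k) (r + 1) 0 (r + 1)
          if pvPref cs p (r + 1) - pvPref cs p lo ≤ k then
            max best ((r : Int) + 1 - (lo : Int)) else best)
        b0 := by
  intro r
  induction r with
  | zero => intro _; simp [pvPref]; omega
  | succ r ih =>
    intro hr1
    obtain ⟨hflips, hle, hval, hmin, hbest⟩ := ih (by omega)
    set fA := fun (st : Int × Nat × Int) (r : Nat) =>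
        let flips := if pvMismatch cs p r then st.1 + 1 else st.1
        let fl := pvShrink cs p k (cs.length + 1) flips st.2.1
        (fl.1, fl.2, max st.2.2 ((r : Int) - (fl.2 : Int) + 1)) with hfA
    set fB := fun (best : Int) (r : Nat) =>
        let lo := pvBsearch (pvPref cs p) (pvPref cs p (r + 1) - k) (r + 1) 0 (r + 1)
        if pvPref cs p (r + 1) - pvPref cs p lo ≤ k then
          max best ((r : Int) + 1 - (lo : Int)) else best with hfB
    set stA := (List.range r).foldl fA ((0 : Int), (0 : Nat), b0) with hstA
    set L := stA.2.1 with hL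
    rw [List.range_succ, List.foldl_append, List.foldl_append]
    simp only [List.foldl_cons, List.foldl_nil]
    -- the least feasible left end for the window ending at r
    obtain ⟨M, hMle, hMval, hMmin⟩ := pvLeast_exists cs p k hk (r + 1)
    have hLM : L ≤ M := by
      by_contra h
      have h1 : ¬ (pvPref cs p r - pvPref cs p M ≤ k) := hmin M (by omega)
      have h2 : pvPref cs p r ≤ pvPref cs p (r + 1) := pvPref_mono cs p (by omega)
      omega
    -- A's step
    have hstep : fA stA r = (pvPref cs p (r + 1) - pvPref cs p M, M,
        max stA.2.2 ((r : Int) - (M : Int) + 1)) := by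
      rw [hfA]
      simp only
      have hfl : (if pvMismatch cs p r then stA.1 + 1 else stA.1)
          = pvPref cs p (r + 1) - pvPref cs p L := by
        rw [hflips]
        by_cases hm : pvMismatch cs p r
        · simp only [hm, if_true, pvPref]; ring
        · simp [pvPref, hm]
      rw [hfl, pvShrink_spec cs p k (r + 1) L M (cs.length + 1) hLM (by omega) hMval hMmin]
    -- B's step: the binary search finds the same least feasible left end
    have hloval : pvPref cs p (r + 1) - k ≤
        pvPref cs p (pvBsearch (pvPref cs p) (pvPref cs p (r + 1) - k) (r + 1) 0 (r + 1)) :=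
      pvBsearch_valid (pvPref cs p) _ (r + 1) 0 (r + 1) (by omega) (by omega) (by omega)
    have hlobelow : ∀ i, i < pvBsearch (pvPref cs p) (pvPref cs p (r + 1) - k) (r + 1) 0 (r + 1) →
        pvPref cs p i < pvPref cs p (r + 1) - k :=
      pvBsearch_below (pvPref cs p) _ (fun i j h => pvPref_mono cs p h) (r + 1) 0 (r + 1)
        (by omega)
    have hloM : pvBsearch (pvPref cs p) (pvPref cs p (r + 1) - k) (r + 1) 0 (r + 1) = M := by
      set lo := pvBsearch (pvPref cs p) (pvPref cs p (r + 1) - k) (r + 1) 0 (r + 1) with hlo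
      rcases Nat.lt_trichotomy lo M with h | h | h
      · exact absurd (by omega : pvPref cs p (r + 1) - pvPref cs p lo ≤ k) (hMmin lo h)
      · exact h
      · have := hlobelow M h; omega
    have hstepB : fB ((List.range r).foldl fB b0) r
        = max ((List.range r).foldl fB b0) ((r : Int) + 1 - (M : Int)) := by
      rw [hfB]
      simp only [hloM, hMval, if_pos]
    rw [hstep, hstepB, ← hbest]
    refine ⟨rfl, by omega, hMval, hMmin, ?_⟩
    have : (r : Int) - (M : Int) + 1 = (r : Int) + 1 - (M : Int) := by ring
    rw [this]

lemma pvInner_eq (cs : List Char) (p k : Int) (hk : 0 ≤ k) (b0 : Int) :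
    pvInnerA cs p k b0 = pvInnerB cs p k b0 := by
  unfold pvInnerA pvInnerB
  exact (pvFold_inv cs p k hk b0 cs.length le_rfl).2.2.2.2

-- ===== VERDICT (by name: the statement is the Claim_ definition above) =====
theorem longestAlternatingSubstring_spec : Claim_equal_longestAlternatingSubstring := by
  intro s k _ hpre
  unfold Spec_longestAlternatingSubstring longestAlternatingSubstring longestAlternatingSubstring_alt
  rcases hpre with h | hk
  · simp [h]
  · by_cases h0 : s.toList.length = 0
    · simp [h0]
    · simp only [h0, if_false]
      rw [pvInner_eq _ _ _ hk, pvInner_eq _ _ _ hk]
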